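-- pv_equiv track=rewrite | github.com/chlendyd7/Algorithm | 레거시/Python/레거시/TODO/기업/모빌/1.py | solution
-- ===== SOURCE A (Python) =====
-- def solution(R):
--     stack = []
--     max_len = 0
--     for i in range(len(R)):
--         if R[i] != 0:
--             stack.append(R[i])
--         else:
--             if stack:
--                 n = max(stack)
--                 max_len = max(max_len, n*len(stack))
--                 stack = []
--
--     return max_len
-- ===== SOURCE B (Python) =====
-- def solution(R):
--     # Recursive decomposition: locate the first zero, score the prefix run
--     # before it, and recurse on the suffix after it.  A prefix with no zero
--     # at all (or an empty list) scores 0.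
--     if 0 in R:
--         k = R.index(0)
--         best = max(R[:k]) * k if k > 0 else 0
--         return max(best, solution(R[k+1:]))
--     return 0
-- ===== Notes on version B (the rewrite author's own statement) =====
-- stated objective: alternative
-- what changed: Replaces the iterative single pass with a stack and running maximum by a recursive divide-at-the-first-zero decomposition: find the first zero with index, score the prefix run max(R[:k])*k, and recurse on the suffix R[k+1:]; a list with no zero scores 0 (so the trailing run is never scored).
import Mathlib
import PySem

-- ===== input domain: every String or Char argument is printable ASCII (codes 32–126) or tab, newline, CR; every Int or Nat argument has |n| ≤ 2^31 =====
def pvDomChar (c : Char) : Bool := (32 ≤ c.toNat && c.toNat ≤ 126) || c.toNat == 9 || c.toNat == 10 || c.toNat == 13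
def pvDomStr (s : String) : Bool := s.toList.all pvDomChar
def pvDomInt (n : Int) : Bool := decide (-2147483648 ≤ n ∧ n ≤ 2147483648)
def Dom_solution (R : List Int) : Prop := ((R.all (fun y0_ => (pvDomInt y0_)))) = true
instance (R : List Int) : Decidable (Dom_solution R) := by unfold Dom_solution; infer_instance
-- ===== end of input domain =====

-- B replaces A's single pass (stack + running maximum) by a recursion that splits at the first zero (objective: alternative decomposition).

-- Python's max() on a nonempty int list; both sides call it only on nonempty lists
def pyMax : List Int → Int
  | [] => 0
  | h :: t => t.foldl max h

-- ===== PORT A =====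
-- `for i in range(len(R)): … R[i] …` visits the elements of R in order; ported as a foldl over R
-- with the loop state (stack, max_len).
def solution (R : List Int) : Int :=
  (R.foldl (fun (s : List Int × Int) x =>
      if x ≠ 0 then (s.1 ++ [x], s.2)
      else if s.1.isEmpty then (s.1, s.2)
      else ([], max s.2 (pyMax s.1 * s.1.length)))
    ([], 0)).2

-- ===== PORT B =====
-- `0 in R` / `R.index(0)` → PySem.List.index?; k ≥ 0, so R[:k] = take k and R[k+1:] = drop (k+1)
def solution_alt (R : List Int) : Int :=
  match h : PySem.List.index? R 0 with
  | none => 0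
  | some k =>
    let best := if 0 < k then pyMax (R.take k) * (k : Int) else 0
    max best (solution_alt (R.drop (k + 1)))
termination_by R.length
decreasing_by
  have hk : k < R.length := by
    obtain ⟨hk, _⟩ := PySem.List.getElem_of_index?_eq_some h
    exact hk
  simp only [List.length_drop]
  omega

-- ===== PRECONDITION & SPEC =====
def Spec_solution (R : List Int) (out : Int) : Prop := out = solution_alt R
instance (R : List Int) (out : Int) : Decidable (Spec_solution R out) := by unfold Spec_solution; infer_instance

-- ===== CLAIM (what is proved, stated in full; the proofs are below) =====
def Claim_equal_solution : Prop := ∀ (R : List Int), Dom_solution R → Spec_solution R (solution R)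

-- ===== LEMMAS AND PROOFS =====

-- A's loop body, named for the lemmas
def stepA (s : List Int × Int) (x : Int) : List Int × Int :=
  if x ≠ 0 then (s.1 ++ [x], s.2)
  else if s.1.isEmpty then (s.1, s.2)
  else ([], max s.2 (pyMax s.1 * s.1.length))

lemma solution_eq_foldl (R : List Int) : solution R = (R.foldl stepA ([], 0)).2 := rfl

-- over a zero-free block the loop only appends to the stack
lemma foldl_no_zero (xs : List Int) (hxs : ∀ x ∈ xs, x ≠ 0) :
    ∀ (cur : List Int) (m : Int), xs.foldl stepA (cur, m) = (cur ++ xs, m) := by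
  induction xs with
  | nil => intro cur m; simp
  | cons x t ih =>
    intro cur m
    have hx : x ≠ 0 := hxs x (by simp)
    simp only [List.foldl_cons, stepA, if_pos hx]
    rw [ih (fun y hy => hxs y (by simp [hy])) (cur ++ [x]) m]
    simp

-- the running maximum never decreases
lemma foldl_mono (xs : List Int) : ∀ (cur : List Int) (m : Int), m ≤ (xs.foldl stepA (cur, m)).2 := by
  induction xs with
  | nil => intro cur m; simp
  | cons x t ih =>
    intro cur m
    simp only [List.foldl_cons, stepA]
    split_ifs with h1 h2
    · exact ih _ m
    · exact ih _ m
    · exact le_trans (le_max_left _ _) (ih _ _)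

-- raising the initial maximum from a to b just maxes b into the result
lemma foldl_max_init (xs : List Int) : ∀ (cur : List Int) (a b : Int), a ≤ b →
    (xs.foldl stepA (cur, b)).2 = max b (xs.foldl stepA (cur, a)).2 := by
  induction xs with
  | nil =>
    intro cur a b hab
    simp [max_eq_left hab]
  | cons x t ih =>
    intro cur a b hab
    simp only [List.foldl_cons, stepA]
    split_ifs with h1 h2
    · exact ih _ a b hab
    · exact ih _ a b hab
    · rw [ih _ (max a (pyMax cur * cur.length)) (max b (pyMax cur * cur.length))
          (max_le_max_right _ hab)]
      have hmono := foldl_mono t [] (max a (pyMax cur * cur.length))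
      omega

-- ===== VERDICT (by name: the statement is the Claim_ definition above) =====
theorem solution_eq_alt (R : List Int) : solution R = solution_alt R := by
  induction R using solution_alt.induct with
  | case1 R h =>
    -- no zero in R
    rw [solution_alt, h]
    have hnz : ∀ x ∈ R, x ≠ 0 := by
      intro x hx hx0
      subst hx0
      have := (PySem.List.index?_eq_none_iff (xs := R) (v := (0 : Int))).mp h
      exact this hx
    rw [solution_eq_foldl, foldl_no_zero R hnz [] 0]
  | case2 R k h ih =>
    obtain ⟨pre, suf, hR, hlen, hpre⟩ := (PySem.List.index?_eq_some_iff R 0 k).mp h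
    subst hlen
    rw [solution_alt]
    split
    case h_1 hnone => rw [h] at hnone; cases hnone
    case h_2 k2 hsome =>
    rw [h] at hsome
    injection hsome with hk2
    subst hk2
    dsimp only
    have hdrop : R.drop (pre.length + 1) = suf := by
      rw [hR, ← List.drop_drop, List.drop_left]
      rfl
    have htake : R.take pre.length = pre := by
      rw [hR, List.take_left]
    have hnzpre : ∀ x ∈ pre, x ≠ 0 := fun x hx hx0 => hpre (hx0 ▸ hx)
    rw [htake, hdrop]
    rw [hdrop] at ih
    rw [← ih]
    conv_lhs => rw [solution_eq_foldl, hR]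
    rw [List.foldl_append, foldl_no_zero pre hnzpre [] 0]
    simp only [List.foldl_cons, stepA, ne_eq, not_true_eq_false, if_false, List.nil_append]
    have hm := foldl_mono suf [] 0
    by_cases hk : 0 < pre.length
    · have hpne : pre ≠ [] := by
        intro hnil; rw [hnil] at hk; simp at hk
      rw [if_neg (by simpa [List.isEmpty_iff] using hpne), if_pos hk]
      rw [foldl_max_init suf [] 0 _ (le_max_left _ _)]
      rw [solution_eq_foldl]
      omega
    · have hpnil : pre = [] := by
        cases pre with
        | nil => rfl
        | cons a t => simp at hk
      subst hpnil
      simp only [List.isEmpty_nil, if_true, if_neg hk]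
      rw [solution_eq_foldl]
      omega

theorem solution_spec : Claim_equal_solution := fun R _ => solution_eq_alt R
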